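-- pv_equiv track=rewrite | github.com/jiten54/nexus-ai-orchestrator | backend/ai_brain.py | _prepare_log_summary
-- ===== SOURCE A (Python) =====
-- from typing import List, Dict, Any, Optional
--
-- def _prepare_log_summary(logs: List[Dict]) -> str:
--     """Prepare a summary of logs for AI analysis"""
--     lines = []
--     error_count = 0
--     warning_count = 0
--
--     for log in logs[:50]:  # Limit to 50 logs
--         level = log.get("level", "INFO")
--         message = log.get("message", "")
--         timestamp = log.get("timestamp", "")
--         component = log.get("component", "system")
--
--         lines.append(f"[{timestamp}] [{level}] [{component}] {message}")
--
--         if level == "ERROR":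
--             error_count += 1
--         elif level == "WARNING":
--             warning_count += 1
--
--     summary = f"Total logs: {len(logs)}, Errors: {error_count}, Warnings: {warning_count}\n\n"
--     summary += "\n".join(lines)
--     return summary
-- ===== SOURCE B (Python) =====
-- def _summarize(logs, budget):
--     """Recursively summarize up to `budget` logs: returns (level counter, body text)."""
--     if not logs or budget == 0:
--         return {}, ""
--     log = logs[0]
--     level = log.get("level", "INFO")
--     line = "[{}] [{}] [{}] {}".format(
--         log.get("timestamp", ""),
--         level,
--         log.get("component", "system"),
--         log.get("message", ""),
--     )
--     counts, rest = _summarize(logs[1:], budget - 1)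
--     counts[level] = counts.get(level, 0) + 1
--     body = line + ("\n" + rest) if (budget > 1 and len(logs) > 1) else line
--     return counts, body
--
--
-- def _prepare_log_summary(logs):
--     """Prepare a summary of logs for AI analysis (recursive counter decomposition)."""
--     counts, body = _summarize(logs, 50)
--     return (
--         f"Total logs: {len(logs)}, Errors: {counts.get('ERROR', 0)}, "
--         f"Warnings: {counts.get('WARNING', 0)}\n\n" + body
--     )
-- ===== Notes on version B (the rewrite author's own statement) =====
-- stated objective: alternative
-- what changed: A's single iterative loop with a lines list and two int counters is replaced by a recursive helper that builds the body string directly (no list + join) and counts every level in a dictionary counter, from which ERROR/WARNING are read at the end.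
import Mathlib
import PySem

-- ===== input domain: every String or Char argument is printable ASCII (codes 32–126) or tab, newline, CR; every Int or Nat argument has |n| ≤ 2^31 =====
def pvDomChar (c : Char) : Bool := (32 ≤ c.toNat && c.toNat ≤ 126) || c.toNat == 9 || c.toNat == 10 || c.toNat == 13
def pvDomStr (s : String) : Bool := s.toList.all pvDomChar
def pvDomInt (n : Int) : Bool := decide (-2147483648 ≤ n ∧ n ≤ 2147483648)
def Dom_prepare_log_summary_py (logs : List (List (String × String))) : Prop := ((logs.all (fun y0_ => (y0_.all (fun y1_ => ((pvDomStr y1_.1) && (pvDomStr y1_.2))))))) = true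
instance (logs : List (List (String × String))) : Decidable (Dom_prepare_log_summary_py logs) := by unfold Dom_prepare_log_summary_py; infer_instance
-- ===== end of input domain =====

-- B replaces A's single loop (lines list + two int counters) by a recursive helper building the
-- body string directly and counting all levels in a dictionary counter; alternative, same cost.

-- ===== PORT A =====
-- A: one loop over logs[:50] carrying (lines, error_count, warning_count) together.
def prepare_log_summary_py (logs : List (List (String × String))) : String :=
  let st := (PySem.List.slice logs none (some 50)).foldl
    (fun (s : List String × Int × Int) log =>
      let d := PySem.Dict.mk log
      let level := d.getD "level" "INFO"
      let message := d.getD "message" ""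
      let timestamp := d.getD "timestamp" ""
      let component := d.getD "component" "system"
      let lines := s.1 ++ ["[" ++ timestamp ++ "] [" ++ level ++ "] [" ++ component ++ "] " ++ message]
      if level == "ERROR" then (lines, s.2.1 + 1, s.2.2)
      else if level == "WARNING" then (lines, s.2.1, s.2.2 + 1)
      else (lines, s.2.1, s.2.2))
    ([], (0 : Int), (0 : Int))
  "Total logs: " ++ PySem.Int.toStr (logs.length : Int) ++ ", Errors: " ++ PySem.Int.toStr st.2.1
    ++ ", Warnings: " ++ PySem.Int.toStr st.2.2 ++ "\n\n" ++ PySem.Str.join "\n" st.1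

-- ===== PORT B =====
-- B's recursive helper _summarize: (level counter, body text) for the first `budget` logs.
def pvSummarize (logs : List (List (String × String))) (budget : Int) :
    PySem.Dict String Int × String :=
  match logs with
  | [] => (PySem.Dict.mk [], "")
  | log :: tl =>
    if budget == 0 then (PySem.Dict.mk [], "")
    else
      let d := PySem.Dict.mk log
      let level := d.getD "level" "INFO"
      let line := "[" ++ d.getD "timestamp" "" ++ "] [" ++ level ++ "] ["
        ++ d.getD "component" "system" ++ "] " ++ d.getD "message" ""
      let cr := pvSummarize tl (budget - 1)
      let counts := cr.1.insert level (cr.1.getD level 0 + 1)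
      let body := if budget > 1 ∧ tl ≠ [] then line ++ "\n" ++ cr.2 else line
      (counts, body)

def prepare_log_summary_py_alt (logs : List (List (String × String))) : String :=
  let cb := pvSummarize logs 50
  "Total logs: " ++ PySem.Int.toStr (logs.length : Int) ++ ", Errors: "
    ++ PySem.Int.toStr (cb.1.getD "ERROR" 0) ++ ", Warnings: "
    ++ PySem.Int.toStr (cb.1.getD "WARNING" 0) ++ "\n\n" ++ cb.2

-- ===== PRECONDITION & SPEC =====
def Spec_prepare_log_summary_py (logs : List (List (String × String))) (out : String) : Prop := out = prepare_log_summary_py_alt logs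
instance (logs : List (List (String × String))) (out : String) : Decidable (Spec_prepare_log_summary_py logs out) := by unfold Spec_prepare_log_summary_py; infer_instance

-- ===== CLAIM (what is proved, stated in full; the proofs are below) =====
def Claim_equal_prepare_log_summary_py : Prop := ∀ (logs : List (List (String × String))), Dom_prepare_log_summary_py logs → Spec_prepare_log_summary_py logs (prepare_log_summary_py logs)

-- ===== LEMMAS AND PROOFS =====
def pvLevel (log : List (String × String)) : String :=
  (PySem.Dict.mk log).getD "level" "INFO"

def pvLine (log : List (String × String)) : String :=
  let d := PySem.Dict.mk log
  "[" ++ d.getD "timestamp" "" ++ "] [" ++ d.getD "level" "INFO" ++ "] ["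
    ++ d.getD "component" "system" ++ "] " ++ d.getD "message" ""

-- A's fused fold equals three separate passes (induction generalising the accumulator)
theorem pv_fold_eq (l : List (List (String × String)))
    (lines : List String) (e w : Int) :
    l.foldl
      (fun (s : List String × Int × Int) log =>
        let d := PySem.Dict.mk log
        let level := d.getD "level" "INFO"
        let message := d.getD "message" ""
        let timestamp := d.getD "timestamp" ""
        let component := d.getD "component" "system"
        let lns := s.1 ++ ["[" ++ timestamp ++ "] [" ++ level ++ "] [" ++ component ++ "] " ++ message]
        if level == "ERROR" then (lns, s.2.1 + 1, s.2.2)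
        else if level == "WARNING" then (lns, s.2.1, s.2.2 + 1)
        else (lns, s.2.1, s.2.2))
      (lines, e, w)
    = (lines ++ l.map pvLine,
       e + ((l.filter (fun log => pvLevel log == "ERROR")).length : Int),
       w + ((l.filter (fun log => pvLevel log == "WARNING")).length : Int)) := by
  induction l generalizing lines e w with
  | nil => simp
  | cons x t ih =>
    simp only [List.foldl_cons, List.map_cons, List.filter_cons]
    by_cases hE : pvLevel x == "ERROR"
    · have hW : ¬ (pvLevel x == "WARNING") := by
        simp only [beq_iff_eq] at hE ⊢; simp [hE]
      simp only [pvLevel] at hE hW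
      rw [if_pos hE, ih]
      simp only [pvLevel, hE, hW, pvLine, Prod.mk.injEq, List.append_assoc]
      refine ⟨rfl, ?_, ?_⟩ <;> simp [hW] <;> omega
    · simp only [pvLevel] at hE
      rw [if_neg hE]
      by_cases hW : (PySem.Dict.mk x).getD "level" "INFO" == "WARNING"
      · rw [if_pos hW, ih]
        simp only [pvLevel, pvLine, Prod.mk.injEq, List.append_assoc]
        refine ⟨rfl, ?_, ?_⟩ <;> simp [hE, hW] <;> omega
      · rw [if_neg hW, ih]
        simp only [pvLevel, pvLine, Prod.mk.injEq, List.append_assoc]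
        refine ⟨rfl, ?_, ?_⟩ <;> simp [hE, hW]

-- String.join "\n" on cons, as the recursion builds it
theorem pv_strJoin_cons2 (x y : String) (xs : List String) :
    PySem.Str.join "\n" (x :: y :: xs) = x ++ "\n" ++ PySem.Str.join "\n" (y :: xs) := by
  rw [← String.toList_inj]
  simp [PySem.Str.toList_join, PySem.Chars.join_cons_cons]

theorem pv_strJoin_one (x : String) : PySem.Str.join "\n" [x] = x := by
  simp [PySem.Str.join, PySem.Chars.join_singleton]

-- characterisation of B's recursive helper on a Nat budget
theorem pvSummarize_spec (logs : List (List (String × String))) (k : Nat) :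
    (∀ lv : String, (pvSummarize logs (k : Int)).1.getD lv 0
        = (((logs.take k).filter (fun log => pvLevel log == lv)).length : Int))
    ∧ (pvSummarize logs (k : Int)).2
        = PySem.Str.join "\n" ((logs.take k).map pvLine) := by
  induction logs generalizing k with
  | nil => simp [pvSummarize, PySem.Str.join, PySem.Chars.join, PySem.Dict.getD, PySem.Dict.get?, List.intercalate]
  | cons x t ih =>
    cases k with
    | zero => simp [pvSummarize, PySem.Str.join, PySem.Chars.join, PySem.Dict.getD, PySem.Dict.get?, List.intercalate]
    | succ k =>
      have hb : (((k + 1 : Nat) : Int) == 0) = false := by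
        simp only [beq_eq_false_iff_ne, ne_eq]
        omega
      have hsub : ((k + 1 : Nat) : Int) - 1 = (k : Int) := by push_cast; ring
      obtain ⟨ihc, ihb⟩ := ih k
      constructor
      · intro lv
        simp only [pvSummarize, hb, Bool.false_eq_true, if_false, hsub,
          List.take_succ_cons, List.filter_cons]
        rw [PySem.Dict.getD_insert]
        by_cases h : lv = pvLevel x
        · simp only [pvLevel] at h
          rw [if_pos h, ihc]
          simp only [pvLevel, ← h, BEq.rfl, if_pos]
          simp only [List.length_cons]
          push_cast
          ring
        · simp only [pvLevel] at h
          rw [if_neg h, ihc]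
          have hne : ((PySem.Dict.mk x).getD "level" "INFO" == lv) = false := by
            simp [Ne.symm h]
          simp only [pvLevel, hne, Bool.false_eq_true, if_false]
      · simp only [pvSummarize, hb, Bool.false_eq_true, if_false, hsub,
          List.take_succ_cons, List.map_cons]
        by_cases hc : ((k + 1 : Nat) : Int) > 1 ∧ t ≠ []
        · rw [if_pos hc, ihb]
          obtain ⟨hk, ht⟩ := hc
          have hk1 : 1 ≤ k := by omega
          obtain ⟨y, t', rfl⟩ : ∃ y t', t = y :: t' := by
            cases t with
            | nil => exact absurd rfl ht
            | cons y t' => exact ⟨y, t', rfl⟩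
          obtain ⟨k', rfl⟩ : ∃ k', k = k' + 1 := ⟨k - 1, by omega⟩
          simp only [List.take_succ_cons, List.map_cons]
          rw [pv_strJoin_cons2]
          simp [pvLine]
        · rw [if_neg hc]
          have : t.take k = [] := by
            rcases not_and_or.mp hc with h1 | h2
            · have : k = 0 := by omega
              simp [this]
            · simp [not_not.mp h2]
          rw [this]
          simp [pv_strJoin_one, pvLine]

-- ===== VERDICT (by name: the statement is the Claim_ definition above) =====
theorem prepare_log_summary_py_spec : Claim_equal_prepare_log_summary_py := by
  intro logs _
  unfold Spec_prepare_log_summary_py prepare_log_summary_py prepare_log_summary_py_alt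
  obtain ⟨hc, hb⟩ := pvSummarize_spec logs 50
  have h50 : ((50 : Nat) : Int) = (50 : Int) := by norm_num
  rw [h50] at hc hb
  have hs : PySem.List.slice logs none (some 50) = logs.take 50 :=
    PySem.List.slice_to logs (by norm_num)
  simp only [hs, pv_fold_eq, hc, hb]
  norm_num
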